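-- pv_equiv track=rewrite | github.com/vgomes-p/managit | program/managit/src/shell_cmds.py | cnt_pipes
-- ===== SOURCE A (Python) =====
-- def cnt_pipes(entry: str):
--     pipes = ["|", "&&"]
--     s_entry = entry.split()
--     pipe_cnt = 0
--     for p in pipes:
--         for e in s_entry:
--             pipe_cnt += 1 if e == p else 0
--     return pipe_cnt
-- ===== SOURCE B (Python) =====
-- def cnt_pipes(entry: str):
--     # One streaming pass over the characters with a tiny DFA; never builds a token list.
--     EMPTY, PIPE, AMP, AMPAMP, BAD = 0, 1, 2, 3, 4
--     cnt = 0
--     st = EMPTY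
--     for c in entry:
--         if c.isspace():
--             if st == PIPE or st == AMPAMP:
--                 cnt += 1
--             st = EMPTY
--         elif st == EMPTY and c == "|":
--             st = PIPE
--         elif st == EMPTY and c == "&":
--             st = AMP
--         elif st == AMP and c == "&":
--             st = AMPAMP
--         else:
--             st = BAD
--     if st == PIPE or st == AMPAMP:
--         cnt += 1
--     return cnt
-- ===== Notes on version B (the rewrite author's own statement) =====
-- stated objective: alternative
-- what changed: Replaces split-then-rescan (tokenize the whole string, then scan the token list once per target symbol) with a single streaming character-level DFA that recognizes the two pipe tokens in one pass with O(1) extra space and no token list.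
import Mathlib
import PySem

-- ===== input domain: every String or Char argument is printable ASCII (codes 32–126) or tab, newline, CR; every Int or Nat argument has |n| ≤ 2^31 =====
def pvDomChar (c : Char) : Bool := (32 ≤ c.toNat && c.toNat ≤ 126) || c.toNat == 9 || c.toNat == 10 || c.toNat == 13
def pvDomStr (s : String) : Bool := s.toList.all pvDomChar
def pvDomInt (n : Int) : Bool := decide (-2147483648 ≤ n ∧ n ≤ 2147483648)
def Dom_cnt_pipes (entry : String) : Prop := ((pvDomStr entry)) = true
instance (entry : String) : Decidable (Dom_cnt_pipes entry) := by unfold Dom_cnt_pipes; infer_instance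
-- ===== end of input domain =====

-- B replaces A's split-then-rescan-per-symbol with one streaming character-level DFA (no token list); same result.

-- ===== PORT A =====
def cnt_pipes (entry : String) : Int :=
  let pipes : List String := ["|", "&&"]
  let s_entry := PySem.Str.split₀ entry
  let pipe_cnt : Int := 0
  pipes.foldl (fun pipe_cnt p =>
    s_entry.foldl (fun pipe_cnt e => pipe_cnt + (if e == p then 1 else 0)) pipe_cnt) pipe_cnt

-- ===== PORT B =====
-- B's DFA step: state 0 = at token start, 1 = token is "|" so far, 2 = "&", 3 = "&&", 4 = dead
def pvStep (s : Int × Nat) (c : Char) : Int × Nat :=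
  if PySem.Chars.isspace c then
    (s.1 + (if s.2 = 1 ∨ s.2 = 3 then 1 else 0), 0)
  else if s.2 = 0 ∧ c = '|' then (s.1, 1)
  else if s.2 = 0 ∧ c = '&' then (s.1, 2)
  else if s.2 = 2 ∧ c = '&' then (s.1, 3)
  else (s.1, 4)

def cnt_pipes_alt (entry : String) : Int :=
  let r := entry.toList.foldl pvStep (0, 0)
  r.1 + (if r.2 = 1 ∨ r.2 = 3 then 1 else 0)

-- ===== PRECONDITION & SPEC =====
def Spec_cnt_pipes (entry : String) (out : Int) : Prop := out = cnt_pipes_alt entry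
instance (entry : String) (out : Int) : Decidable (Spec_cnt_pipes entry out) := by unfold Spec_cnt_pipes; infer_instance

-- ===== CLAIM (what is proved, stated in full; the proofs are below) =====
def Claim_equal_cnt_pipes : Prop := ∀ (entry : String), Dom_cnt_pipes entry → Spec_cnt_pipes entry (cnt_pipes entry)

-- ===== LEMMAS AND PROOFS =====

-- A's inner loop counts occurrences of p
theorem foldl_count_eq (l : List String) (p : String) (init : Int) :
    l.foldl (fun acc e => acc + (if e == p then 1 else 0)) init = init + l.count p := by
  induction l generalizing init with
  | nil => simp
  | cons x xs ih =>
    simp only [List.foldl_cons, ih, List.count_cons]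
    by_cases h : x = p
    · simp [h]; ring
    · simp [h]

-- abstraction of split₀.go's current (reversed) token into B's DFA state
def pvAbs (cur : List Char) : Nat :=
  if cur = [] then 0 else if cur = ['|'] then 1 else if cur = ['&'] then 2
  else if cur = ['&', '&'] then 3 else 4

def pvCountT (l : List (List Char)) : Int :=
  (l.count ['|'] : Int) + (l.count ['&', '&'] : Int)

theorem pvCountT_reverse (l : List (List Char)) : pvCountT l.reverse = pvCountT l := by
  simp [pvCountT]

theorem pvCountT_cons (w : List Char) (l : List (List Char)) :
    pvCountT (w :: l) = pvCountT l + (if pvAbs w = 1 ∨ pvAbs w = 3 then 1 else 0) := by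
  unfold pvCountT pvAbs
  rcases w with _ | ⟨d, _ | ⟨e, _ | ⟨f, tl⟩⟩⟩ <;> split_ifs <;>
    simp_all <;> omega

theorem pvAbs_reverse (cur : List Char) : pvAbs cur.reverse = pvAbs cur := by
  unfold pvAbs
  simp [List.reverse_eq_iff]

theorem pvStep_space (cnt : Int) (st : Nat) (c : Char) (hc : PySem.Chars.isspace c = true) :
    pvStep (cnt, st) c = (cnt + (if st = 1 ∨ st = 3 then 1 else 0), 0) := by
  simp [pvStep, hc]

set_option maxHeartbeats 1000000 in
theorem pvStep_word (cnt : Int) (cur : List Char) (c : Char)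
    (hc : PySem.Chars.isspace c = false) :
    pvStep (cnt, pvAbs cur) c = (cnt, pvAbs (c :: cur)) := by
  unfold pvStep pvAbs
  rw [hc]
  rcases cur with _ | ⟨d, _ | ⟨e, tl⟩⟩ <;> split_ifs <;> simp_all

-- main invariant: running B's DFA from the abstracted state agrees with counting
-- the target tokens in split₀.go's output
theorem pvKey (rest : List Char) : ∀ (cur : List Char) (acc : List (List Char)) (cnt : Int),
    (rest.foldl pvStep (cnt, pvAbs cur)).1
      + (if (rest.foldl pvStep (cnt, pvAbs cur)).2 = 1 ∨ (rest.foldl pvStep (cnt, pvAbs cur)).2 = 3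
         then 1 else 0)
      + pvCountT acc
    = cnt + pvCountT (PySem.Chars.split₀.go rest cur acc) := by
  induction rest with
  | nil =>
    intro cur acc cnt
    simp only [List.foldl_nil, PySem.Chars.split₀.go]
    by_cases hc : cur = []
    · simp [hc, pvAbs, pvCountT_reverse]
    · have he : cur.isEmpty = false := by simpa [List.isEmpty_iff] using hc
      rw [he]
      simp only [Bool.false_eq_true, if_false, pvCountT_reverse, pvCountT_cons,
        pvAbs_reverse]
      omega
  | cons c rest ih =>
    intro cur acc cnt
    simp only [List.foldl_cons, PySem.Chars.split₀.go]
    by_cases hs : PySem.Chars.isspace c = true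
    · rw [hs, if_pos rfl]
      simp only [pvStep_space _ _ _ hs]
      by_cases hc : cur = []
      · have he : cur.isEmpty = true := by simp [hc]
        rw [he, if_pos rfl]
        have h0 : pvAbs cur = 0 := by simp [hc, pvAbs]
        have := ih [] acc (cnt + (if pvAbs cur = 1 ∨ pvAbs cur = 3 then 1 else 0))
        have habs : pvAbs ([] : List Char) = 0 := by simp [pvAbs]
        rw [habs] at this
        rw [this, h0]
        norm_num
      · have he : cur.isEmpty = false := by simpa [List.isEmpty_iff] using hc
        rw [he]
        simp only [Bool.false_eq_true, if_false]
        have := ih [] (cur.reverse :: acc) (cnt + (if pvAbs cur = 1 ∨ pvAbs cur = 3 then 1 else 0))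
        have habs : pvAbs ([] : List Char) = 0 := by simp [pvAbs]
        rw [habs] at this
        rw [pvCountT_cons] at this
        rw [pvAbs_reverse] at this
        omega
    · have hs' : PySem.Chars.isspace c = false := by simpa using hs
      rw [hs']
      simp only [Bool.false_eq_true, if_false, pvStep_word _ _ _ hs']
      exact ih (c :: cur) acc cnt

-- ===== VERDICT (by name: the statement is the Claim_ definition above) =====
theorem cnt_pipes_spec : Claim_equal_cnt_pipes := by
  intro entry _
  unfold Spec_cnt_pipes cnt_pipes cnt_pipes_alt
  simp only [List.foldl_cons, List.foldl_nil, foldl_count_eq]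
  have hB := pvKey entry.toList [] [] 0
  have habs : pvAbs ([] : List Char) = 0 := by simp [pvAbs]
  rw [habs] at hB
  simp only [pvCountT, List.count_nil, Int.natCast_zero, add_zero] at hB
  have hgo : PySem.Chars.split₀ entry.toList = PySem.Chars.split₀.go entry.toList [] [] := rfl
  have hsplit : (PySem.Str.split₀ entry).map String.toList = PySem.Chars.split₀ entry.toList := by
    simp [PySem.Str.split₀_map_toList]
  have h1 : (PySem.Str.split₀ entry).count "|" = (PySem.Chars.split₀.go entry.toList [] []).count ['|'] := by
    rw [← hgo, ← hsplit]
    exact (List.count_map_of_injective _ String.toList (fun _ _ h => String.toList_inj.mp h) "|").symm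
  have h2 : (PySem.Str.split₀ entry).count "&&" = (PySem.Chars.split₀.go entry.toList [] []).count ['&', '&'] := by
    rw [← hgo, ← hsplit]
    exact (List.count_map_of_injective _ String.toList (fun _ _ h => String.toList_inj.mp h) "&&").symm
  simp only [h1, h2]
  omega
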